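-- pv_equiv track=rewrite | github.com/sanjana2523/github-projects | P6.py | method_name
-- ===== SOURCE A (Python) =====
-- def method_name(words):
--     maxlength = 0
--     curr_letter, curr_length = None, 0
--     for word in words:
--          if not curr_letter or curr_letter != word[0]:
--             maxlength = max(maxlength, curr_length)
--             curr_letter, curr_length = word[0], 1
--          else:
--             curr_length += 1
--     return max(maxlength, curr_length)
-- ===== SOURCE B (Python) =====
-- def method_name(words):
--     best = 0
--     rest = words
--     while rest:
--         head = rest[0][0]
--         n = 1
--         while n < len(rest) and rest[n][0] == head:
--             n += 1
--         best = max(best, n)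
--         rest = rest[n:]
--     return best
-- ===== Notes on version B (the rewrite author's own statement) =====
-- stated objective: alternative
-- what changed: B scans each maximal same-first-letter run with an inner loop and slices past it, instead of A's single fold threading curr_letter/curr_length/maxlength state with a boundary branch.
-- outside the precondition, e.g. on method_name(['a', '']): A raises IndexError, B raises IndexError
import Mathlib
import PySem

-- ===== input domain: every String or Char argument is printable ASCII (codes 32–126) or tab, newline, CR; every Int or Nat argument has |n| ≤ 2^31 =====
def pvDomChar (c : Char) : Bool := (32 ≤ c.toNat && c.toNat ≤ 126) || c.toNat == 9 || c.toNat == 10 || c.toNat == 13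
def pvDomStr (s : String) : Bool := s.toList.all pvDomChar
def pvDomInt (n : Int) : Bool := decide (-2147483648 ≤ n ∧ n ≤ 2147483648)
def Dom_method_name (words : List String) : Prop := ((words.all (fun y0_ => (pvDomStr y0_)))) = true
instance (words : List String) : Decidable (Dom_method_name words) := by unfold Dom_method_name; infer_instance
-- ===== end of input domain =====

-- B is an alternative decomposition: it consumes one maximal same-first-letter run at a time
-- (inner scan + slice) instead of A's single fold threading curr_letter/curr_length/maxlength.
-- Pre_ excludes lists containing the empty string, on which both Pythons raise IndexError (word[0]).

-- ===== PORT A =====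
-- word[0]; total via default, Pre_ excludes the empty string where Python raises IndexError
def pvHd0 (w : String) : Char := (PySem.Str.pyGet? w 0).getD ' '

-- A's loop body: `not curr_letter` ⇔ curr_letter is None (the only falsy value reachable)
def pvStep (st : Int × Option Char × Int) (word : String) : Int × Option Char × Int :=
  if st.2.1 = none ∨ st.2.1 ≠ some (pvHd0 word) then
    (max st.1 st.2.2, some (pvHd0 word), 1)
  else
    (st.1, st.2.1, st.2.2 + 1)

def method_name (words : List String) : Int :=
  let st := words.foldl pvStep (0, none, 0)
  max st.1 st.2.2

-- ===== PORT B =====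
-- inner `while`: length of the leading block of words starting with k
def pvRunLen (k : Char) : List String → Nat
  | [] => 0
  | w :: ws => if pvHd0 w = k then pvRunLen k ws + 1 else 0

-- outer `while rest:` loop with accumulator best
def pvAltGo : List String → Int → Int
  | [], best => best
  | w :: ws, best =>
      let n := pvRunLen (pvHd0 w) ws
      pvAltGo (ws.drop n) (max best ((n : Int) + 1))
termination_by l _ => l.length
decreasing_by simp only [List.length_drop, List.length_cons]; omega

def method_name_alt (words : List String) : Int := pvAltGo words 0

-- ===== PRECONDITION & SPEC =====
-- Pre_ excludes exactly the inputs containing "", on which Python A (and Python B) raise IndexError.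
def Pre_method_name (words : List String) : Prop := ∀ w ∈ words, w ≠ ""
instance (words : List String) : Decidable (Pre_method_name words) := by unfold Pre_method_name; infer_instance
def pvWitness_method_name : List String := ["ab", "ax", "b"]
def Spec_method_name (words : List String) (out : Int) : Prop := out = method_name_alt words
instance (words : List String) (out : Int) : Decidable (Spec_method_name words out) := by unfold Spec_method_name; infer_instance

-- ===== CLAIM (what is proved, stated in full; the proofs are below) =====
def Claim_equal_method_name : Prop := ∀ (words : List String), Dom_method_name words → Pre_method_name words → Spec_method_name words (method_name words)

-- ===== LEMMAS AND PROOFS =====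

theorem pvAltGo_nil (b : Int) : pvAltGo [] b = b := by
  rw [pvAltGo]

theorem pvAltGo_cons (w : String) (ws : List String) (b : Int) :
    pvAltGo (w :: ws) b
      = pvAltGo (ws.drop (pvRunLen (pvHd0 w) ws)) (max b ((pvRunLen (pvHd0 w) ws : Int) + 1)) := by
  rw [pvAltGo]

theorem pvStep_eq (m c : Int) (k : Char) (w : String) (h : pvHd0 w = k) :
    pvStep (m, some k, c) w = (m, some k, c + 1) := by
  simp [pvStep, h]

theorem pvStep_ne (m c : Int) (k : Char) (w : String) (h : pvHd0 w ≠ k) :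
    pvStep (m, some k, c) w = (max m c, some (pvHd0 w), 1) := by
  have : (some k : Option Char) ≠ some (pvHd0 w) := by
    simp; exact fun e => h e.symm
  simp [pvStep, this]

theorem pvStep_none (m c : Int) (w : String) :
    pvStep (m, none, c) w = (max m c, some (pvHd0 w), 1) := by
  simp [pvStep]

-- A's fold, continued from a committed state (m, some k, c), finishes to B's run-scanning loop.
theorem pvFold_eq_altGo (ws : List String) : ∀ (m c : Int) (k : Char),
    (let st := ws.foldl pvStep (m, some k, c); max st.1 st.2.2)
      = pvAltGo (ws.drop (pvRunLen k ws)) (max m (c + pvRunLen k ws)) := by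
  induction ws with
  | nil => intro m c k; simp [pvAltGo_nil]
  | cons w ws ih =>
    intro m c k
    by_cases h : pvHd0 w = k
    · simp only [List.foldl_cons, pvStep_eq m c k w h, pvRunLen, if_pos h]
      rw [ih m (c + 1) k]
      have harith : c + 1 + (pvRunLen k ws : Int) = c + ((pvRunLen k ws : Nat) + 1 : Nat) := by
        push_cast; ring
      simp [List.drop_succ_cons, harith]
    · simp only [List.foldl_cons, pvStep_ne m c k w h, pvRunLen, if_neg h]
      rw [ih (max m c) 1 (pvHd0 w)]
      rw [List.drop_zero, pvAltGo_cons]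
      congr 1
      omega

-- ===== VERDICT (by name: the statement is the Claim_ definition above) =====
theorem method_name_spec : Claim_equal_method_name := by
  intro words _ _
  unfold Spec_method_name method_name method_name_alt
  cases words with
  | nil => simp [pvAltGo_nil]
  | cons w ws =>
    simp only [List.foldl_cons, pvStep_none]
    rw [pvFold_eq_altGo ws (max 0 0) 1 (pvHd0 w)]
    rw [pvAltGo_cons]
    congr 1
    omega
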